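-- pv_equiv track=rewrite | github.com/YiyongZhao/PhyloTracer | bin/Ortho_Retriever.py | rename_OGs_tre_name
-- ===== SOURCE A (Python) =====
-- def rename_OGs_tre_name(
--     principal_gene_S: list,
--     minor_othologs_L: list,
--     tre_ID: str,
-- ) -> list:
--     """
--     Assign ordered names to ortholog groups for output tracking.
--
--     Parameters
--     ----------
--     principal_gene_S : list
--         Main ortholog gene set.
--     minor_othologs_L : list
--         List of minor ortholog gene sets.
--     tre_ID : str
--         Tree identifier used as a prefix.
--
--     Returns
--     -------
--     list
--         List of (tree_name, gene_set) tuples.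
--
--     Assumptions
--     -----------
--     Ortholog group sizes determine output ordering.
--     """
--     OG_count = len(minor_othologs_L) + 1
--     tre_name_L = ["T" + str(i + 1) for i in range(OG_count)]
--     sps_num_L = [len(OG) for OG in minor_othologs_L]
--
--     tre_name2sps_num_dict = dict(zip(tre_name_L, sps_num_L))
--     tre_name2OG_dict = dict(zip(tre_name_L, minor_othologs_L))
--     orderd_OG_sps_num_L = sorted(
--         tre_name2sps_num_dict.items(),
--         key=lambda x: x[1],
--         reverse=True,
--     )
--
--     ordered_name_OG_L = []
--     ordered_name_OG_L.append(
--         (str(tre_ID) + "_" + tre_name_L[0] + "_" + str(len(principal_gene_S)), principal_gene_S)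
--     )
--     index = 0
--     for name, count in orderd_OG_sps_num_L:
--         index += 1
--         ordered_name_OG_L.append(
--             (str(tre_ID) + "_" + tre_name_L[index] + "_" + str(count), tre_name2OG_dict[name])
--         )
--     return ordered_name_OG_L
-- ===== SOURCE B (Python) =====
-- def rename_OGs_tre_name(
--     principal_gene_S: list,
--     minor_othologs_L: list,
--     tre_ID: str,
-- ) -> list:
--     """Pigeonhole by size instead of sorting the groups: collect the distinct
--     group sizes, sort only those (descending), then for each size emit the
--     groups of that size in input order (which preserves the stable tie order).
--     No full-list sort, no name dicts, no lookups."""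
--     out = [(str(tre_ID) + "_T1_" + str(len(principal_gene_S)), principal_gene_S)]
--     i = 2
--     for size in sorted({len(OG) for OG in minor_othologs_L}, reverse=True):
--         for OG in minor_othologs_L:
--             if len(OG) == size:
--                 out.append((str(tre_ID) + "_T" + str(i) + "_" + str(size), OG))
--                 i += 1
--     return out
-- ===== Notes on version B (the rewrite author's own statement) =====
-- stated objective: alternative
-- what changed: Replaces A's sort of the whole (name,size) pair list plus two name dicts by a pigeonhole pass: sort only the distinct group sizes descending, then for each size scan the input once emitting the groups of that size in input order (stable ties fall out of the input order).
import Mathlib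
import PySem

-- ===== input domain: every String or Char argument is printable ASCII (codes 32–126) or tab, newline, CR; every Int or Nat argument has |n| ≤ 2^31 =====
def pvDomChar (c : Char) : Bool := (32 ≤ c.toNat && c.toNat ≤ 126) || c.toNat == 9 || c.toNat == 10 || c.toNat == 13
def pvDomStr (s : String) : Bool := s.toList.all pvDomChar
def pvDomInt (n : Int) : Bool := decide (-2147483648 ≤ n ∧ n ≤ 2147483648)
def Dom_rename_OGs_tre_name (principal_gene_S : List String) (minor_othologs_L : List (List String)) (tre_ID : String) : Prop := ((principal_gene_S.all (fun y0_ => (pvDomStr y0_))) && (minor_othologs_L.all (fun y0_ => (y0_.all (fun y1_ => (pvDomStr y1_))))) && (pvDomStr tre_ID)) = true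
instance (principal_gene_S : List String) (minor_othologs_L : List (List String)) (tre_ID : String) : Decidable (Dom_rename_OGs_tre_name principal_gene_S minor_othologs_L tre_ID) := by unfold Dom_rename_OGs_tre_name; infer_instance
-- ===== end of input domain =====

-- B replaces A's full sort of the (name,size) pairs and its two name dicts by a pigeonhole
-- pass: sort only the DISTINCT group sizes descending, then for each size scan the input
-- once, emitting the groups of that size in input order (objective: alternative).

-- ===== PORT A =====
-- Literal transliteration of A. The list index tre_name_L[index] is always in range
-- (index ≤ len(minor) < len(tre_name_L)) and the dict key is always present (both dicts
-- are zipped from the same key list), so Python never raises there; pyGetD ""/.getD []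
-- are exact on those in-range/present accesses.
def rename_OGs_tre_name (principal_gene_S : List String) (minor_othologs_L : List (List String)) (tre_ID : String) : List (String × List String) :=
  let OG_count : Int := (minor_othologs_L.length : Int) + 1
  let tre_name_L : List String := (PySem.List.pyRange 0 OG_count).map (fun i => "T" ++ PySem.Int.toStr (i + 1))
  let sps_num_L : List Int := minor_othologs_L.map (fun OG => (OG.length : Int))
  let tre_name2sps_num_dict : PySem.Dict String Int := PySem.Dict.ofList (tre_name_L.zip sps_num_L)
  let tre_name2OG_dict : PySem.Dict String (List String) := PySem.Dict.ofList (tre_name_L.zip minor_othologs_L)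
  let orderd_OG_sps_num_L : List (String × Int) := PySem.List.sorted tre_name2sps_num_dict.items (fun x => x.2) true
  let first : String × List String :=
    (tre_ID ++ "_" ++ PySem.List.pyGetD tre_name_L 0 "" ++ "_" ++ PySem.Int.toStr (principal_gene_S.length : Int), principal_gene_S)
  (orderd_OG_sps_num_L.foldl
    (fun (st : Int × List (String × List String)) nc =>
      let index := st.1 + 1
      (index, st.2 ++ [(tre_ID ++ "_" ++ PySem.List.pyGetD tre_name_L index "" ++ "_" ++ PySem.Int.toStr nc.2,
                        (tre_name2OG_dict.get? nc.1).getD [])]))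
    (0, [first])).2

-- ===== PORT B =====
-- Transliteration of Source B: sorted({len(OG) for OG in minor}) = PySem.List.sorted of the
-- PySem.Set of lengths; then the two nested for-loops with the counter i as foldl state.
def rename_OGs_tre_name_alt (principal_gene_S : List String) (minor_othologs_L : List (List String)) (tre_ID : String) : List (String × List String) :=
  let out0 : List (String × List String) :=
    [(tre_ID ++ "_T1_" ++ PySem.Int.toStr (principal_gene_S.length : Int), principal_gene_S)]
  let sizes : List Int := PySem.List.sorted (PySem.Set.ofList (minor_othologs_L.map (fun OG => (OG.length : Int)))) (fun x => x) true
  (sizes.foldl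
    (fun (st : Int × List (String × List String)) size =>
      minor_othologs_L.foldl
        (fun (st : Int × List (String × List String)) OG =>
          if ((OG.length : Int) == size) then
            (st.1 + 1, st.2 ++ [(tre_ID ++ "_T" ++ PySem.Int.toStr st.1 ++ "_" ++ PySem.Int.toStr size, OG)])
          else st)
        st)
    (2, out0)).2

-- ===== PRECONDITION & SPEC =====
def Spec_rename_OGs_tre_name (principal_gene_S : List String) (minor_othologs_L : List (List String)) (tre_ID : String) (out : List (String × List String)) : Prop := out = rename_OGs_tre_name_alt principal_gene_S minor_othologs_L tre_ID
instance (principal_gene_S : List String) (minor_othologs_L : List (List String)) (tre_ID : String) (out : List (String × List String)) : Decidable (Spec_rename_OGs_tre_name principal_gene_S minor_othologs_L tre_ID out) := by unfold Spec_rename_OGs_tre_name; infer_instance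

-- ===== CLAIM (what is proved, stated in full; the proofs are below) =====
def Claim_equal_rename_OGs_tre_name : Prop := ∀ (principal_gene_S : List String) (minor_othologs_L : List (List String)) (tre_ID : String), Dom_rename_OGs_tre_name principal_gene_S minor_othologs_L tre_ID → Spec_rename_OGs_tre_name principal_gene_S minor_othologs_L tre_ID (rename_OGs_tre_name principal_gene_S minor_othologs_L tre_ID)

-- ===== LEMMAS AND PROOFS =====

-- the common canonical form both ports are proved equal to:
-- principal entry, then the stably size-sorted minor groups enumerated from 2
def pvCanon (principal_gene_S : List String) (minor_othologs_L : List (List String)) (tre_ID : String) : List (String × List String) :=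
  (tre_ID ++ "_T1_" ++ PySem.Int.toStr (principal_gene_S.length : Int), principal_gene_S) ::
  (PySem.List.enumerate (PySem.List.sorted minor_othologs_L (fun OG => (OG.length : Int)) true) 2).map
    (fun q => (tre_ID ++ "_T" ++ PySem.Int.toStr q.1 ++ "_" ++ PySem.Int.toStr (q.2.length : Int), q.2))

-- str(n) is injective on positive naturals: Nat.toDigits 10 writes the decimal digits.
lemma pv_toDigitsCore_eq (f : Nat) : ∀ (n : Nat) (l : List Char), 0 < n → n < f →
    Nat.toDigitsCore 10 f n l = ((Nat.digits 10 n).map Nat.digitChar).reverse ++ l := by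
  induction f with
  | zero => intro n l h1 h2; omega
  | succ f ih =>
    intro n l h1 h2
    rw [Nat.toDigitsCore]
    by_cases h : n / 10 = 0
    · simp only [h, if_pos]
      rw [Nat.digits_def' (by norm_num) h1, h, Nat.digits_zero]
      simp
    · rw [if_neg h]
      have hp : 0 < n / 10 := Nat.pos_of_ne_zero h
      have hlt : n / 10 < f := lt_of_lt_of_le (Nat.div_lt_self h1 (by norm_num)) (by omega)
      rw [ih _ _ hp hlt, Nat.digits_def' (by norm_num) h1]
      simp

lemma pv_digitChar_inj (x y : Nat) (hx : x < 10) (hy : y < 10)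
    (h : Nat.digitChar x = Nat.digitChar y) : x = y := by
  interval_cases x <;> interval_cases y <;> simp_all [Nat.digitChar]

lemma pv_map_digitChar_inj : ∀ (l1 l2 : List Nat), (∀ x ∈ l1, x < 10) → (∀ x ∈ l2, x < 10) →
    l1.map Nat.digitChar = l2.map Nat.digitChar → l1 = l2 := by
  intro l1
  induction l1 with
  | nil => intro l2 _ _ h; cases l2 <;> simp_all
  | cons x xs ih =>
    intro l2 h1 h2 h
    cases l2 with
    | nil => simp_all
    | cons y ys =>
      simp only [List.map_cons, List.cons.injEq] at h
      have hx := pv_digitChar_inj x y (h1 x (by simp)) (h2 y (by simp)) h.1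
      subst hx
      rw [ih ys (fun z hz => h1 z (by simp [hz])) (fun z hz => h2 z (by simp [hz])) h.2]

lemma pv_toDigits_inj (a b : Nat) (ha : 0 < a) (hb : 0 < b)
    (h : Nat.toDigits 10 a = Nat.toDigits 10 b) : a = b := by
  unfold Nat.toDigits at h
  rw [pv_toDigitsCore_eq (a + 1) a [] ha (by omega),
      pv_toDigitsCore_eq (b + 1) b [] hb (by omega)] at h
  simp only [List.append_nil] at h
  have hd : Nat.digits 10 a = Nat.digits 10 b :=
    pv_map_digitChar_inj _ _ (fun x hx => Nat.digits_lt_base (by norm_num) hx)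
      (fun x hx => Nat.digits_lt_base (by norm_num) hx) (List.reverse_inj.mp h)
  calc a = Nat.ofDigits 10 (Nat.digits 10 a) := (Nat.ofDigits_digits 10 a).symm
    _ = Nat.ofDigits 10 (Nat.digits 10 b) := by rw [hd]
    _ = b := Nat.ofDigits_digits 10 b

lemma pv_f_inj : Function.Injective (fun k : Nat => "T" ++ PySem.Int.toStr ((k : Int) + 1)) := by
  intro a b h
  have h2 : PySem.Int.toChars ((a : Int) + 1) = PySem.Int.toChars ((b : Int) + 1) := by
    have := congrArg String.toList h
    simpa [String.toList_append, PySem.Int.toList_toStr] using this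
  simp only [PySem.Int.toChars, show ¬((a : Int) + 1 < 0) by omega,
    show ¬((b : Int) + 1 < 0) by omega, if_false,
    show ((a : Int) + 1).toNat = a + 1 by omega, show ((b : Int) + 1).toNat = b + 1 by omega] at h2
  have := pv_toDigits_inj (a + 1) (b + 1) (by omega) (by omega) h2
  omega

-- first-match lookup in an association list with distinct keys
lemma pv_find?_nodup {ν : Type} (l : List (String × ν)) (k : String) (v : ν)
    (hnd : (l.map Prod.fst).Nodup) (hm : (k, v) ∈ l) :
    l.find? (fun p => p.1 == k) = some (k, v) := by
  induction l with
  | nil => simp at hm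
  | cons x xs ih =>
    simp only [List.map_cons, List.nodup_cons] at hnd
    rcases List.mem_cons.mp hm with h | h
    · subst h; simp [List.find?]
    · have hne : x.1 ≠ k := by
        intro he
        exact hnd.1 (he ▸ (List.mem_map.mpr ⟨(k, v), h, rfl⟩))
      rw [List.find?_cons_of_neg (by simpa using hne)]
      exact ih hnd.2 h

-- insertBy commutes with map
lemma pv_insertBy_map {α β : Type} (q : β → β → Bool) (g : α → β) (x : α) (ys : List α) :
    PySem.List.insertBy q (g x) (ys.map g) =
      (PySem.List.insertBy (fun a b => q (g a) (g b)) x ys).map g := by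
  induction ys with
  | nil => simp [PySem.List.insertBy]
  | cons y ys ih =>
    simp only [List.map_cons, PySem.List.insertBy]
    by_cases h : q (g x) (g y)
    · simp [h]
    · simp [h, ih]

-- a stable sort of a mapped list is the mapped stable sort under the composed key
lemma pv_sorted_map {α β κ : Type} [LT κ] [DecidableLT κ] (g : α → β) (key : β → κ) (xs : List α) :
    PySem.List.sorted (xs.map g) key true =
      (PySem.List.sorted xs (fun a => key (g a)) true).map g := by
  rw [PySem.List.sorted_rev_eq_foldl_insertBy, PySem.List.sorted_rev_eq_foldl_insertBy]
  suffices h : ∀ (acc : List α),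
      (xs.map g).foldl (fun acc x => PySem.List.insertBy (fun a b => decide (key b < key a)) x acc) (acc.map g) =
      (xs.foldl (fun acc x => PySem.List.insertBy (fun a b => decide (key (g b) < key (g a))) x acc) acc).map g by
    simpa using h []
  induction xs with
  | nil => intro acc; simp
  | cons x xs ih =>
    intro acc
    simp only [List.map_cons, List.foldl_cons]
    rw [pv_insertBy_map (fun a b => decide (key b < key a)) g x acc]
    exact ih _

lemma pv_enumerate_map {α β : Type} (g : α → β) (l : List α) : ∀ (s : Int),
    PySem.List.enumerate (l.map g) s = (PySem.List.enumerate l s).map (fun q => (q.1, g q.2)) := by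
  induction l with
  | nil => intro s; simp [PySem.List.enumerate]
  | cons x xs ih => intro s; simp [PySem.List.enumerate_cons, ih]

lemma pv_enumerate_shift {α : Type} (l : List α) : ∀ (s : Int),
    PySem.List.enumerate l (s + 1) = (PySem.List.enumerate l s).map (fun q => (q.1 + 1, q.2)) := by
  induction l with
  | nil => intro s; simp [PySem.List.enumerate]
  | cons x xs ih => intro s; simp [PySem.List.enumerate_cons, ih]

-- the indexed append loop of A, characterised by enumerate
lemma pv_foldl_loop (t : String) (TN : List String) (D2 : PySem.Dict String (List String))
    (l : List (String × Int)) : ∀ (j : Int) (acc : List (String × List String)),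
    (l.foldl (fun (st : Int × List (String × List String)) nc =>
        (st.1 + 1, st.2 ++ [(t ++ "_" ++ PySem.List.pyGetD TN (st.1 + 1) "" ++ "_" ++ PySem.Int.toStr nc.2,
          (D2.get? nc.1).getD [])])) (j, acc)).2
      = acc ++ (PySem.List.enumerate l (j + 1)).map (fun q =>
          (t ++ "_" ++ PySem.List.pyGetD TN q.1 "" ++ "_" ++ PySem.Int.toStr q.2.2,
            (D2.get? q.2.1).getD [])) := by
  induction l with
  | nil => intro j acc; simp [PySem.List.enumerate]
  | cons x xs ih =>
    intro j acc
    simp only [List.foldl_cons, PySem.List.enumerate_cons, List.map_cons]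
    rw [ih]
    simp

lemma pv_str1 (t s c : String) : t ++ "_" ++ ("T" ++ s) ++ "_" ++ c = t ++ "_T" ++ s ++ "_" ++ c := by
  simp only [String.append_assoc]
  rw [← @String.append_assoc "_" "T" (s ++ ("_" ++ c))]
  rfl

lemma pv_str0 (t c : String) : t ++ "_" ++ "T1" ++ "_" ++ c = t ++ "_T1_" ++ c := by
  simp only [String.append_assoc]
  rw [← @String.append_assoc "_" "T1" ("_" ++ c), ← @String.append_assoc ("_" ++ "T1") "_" c]
  rfl

-- ===== A = canonical form =====
lemma pv_main_A (p : List String) (m : List (List String)) (t : String) :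
    rename_OGs_tre_name p m t = pvCanon p m t := by
  set f : Nat → String := fun k : Nat => "T" ++ PySem.Int.toStr ((k : Int) + 1) with hf
  set n := m.length with hn
  set names' : List String := (List.range n).map f with hnames'
  set Z : List (String × List String) := names'.zip m with hZ
  have hn'len : names'.length = n := by simp [hnames']
  have hmn : names'.length = m.length := by rw [hn'len, hn]
  have hZfst : Z.map Prod.fst = names' := List.map_fst_zip hmn.le
  have hZsnd : Z.map Prod.snd = m := List.map_snd_zip hmn.ge
  have hZlen : Z.length = n := by rw [hZ, List.length_zip, hmn, Nat.min_self, hn]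
  have hnodup : names'.Nodup := List.Nodup.map pv_f_inj (List.nodup_range)
  simp only [rename_OGs_tre_name, pvCanon]
  have htoNat : (((n : Int)) + 1).toNat = n + 1 := by omega
  rw [PySem.List.pyRange_zero, htoNat, List.map_map]
  have hTNeq : (List.map ((fun i => "T" ++ PySem.Int.toStr (i + 1)) ∘ fun k : Nat => (k : Int)) (List.range (n + 1)))
      = (List.range (n + 1)).map f := rfl
  rw [hTNeq]
  set TN : List String := (List.range (n + 1)).map f with hTN
  have hTNsplit : TN = names' ++ [f n] := by
    rw [hTN, List.range_succ, List.map_append, hnames']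
    rfl
  -- both zipped pair lists are really Z-shaped: the extra (n+1)-th name is dropped by zip
  have hz2 : TN.zip m = Z := by
    rw [hTNsplit]
    conv_lhs => rw [show m = m ++ [] from (List.append_nil m).symm]
    rw [List.zip_append hmn]
    simp [hZ]
  have hz1 : TN.zip (m.map (fun OG => ((OG.length : Int)))) =
      Z.map (fun q => (q.1, (q.2.length : Int))) := by
    rw [hTNsplit]
    conv_lhs => rw [show m.map (fun OG => ((OG.length : Int))) = m.map (fun OG => ((OG.length : Int))) ++ [] from (List.append_nil _).symm]
    rw [List.zip_append (by simpa using hmn), List.zip_map_right]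
    simp [hZ, Prod.map]
  rw [hz1, hz2]
  -- dict items are exactly the zipped pair lists (fresh, distinct keys)
  have hd1items : (PySem.Dict.ofList (Z.map (fun q => (q.1, (q.2.length : Int)))) : PySem.Dict String Int).items
      = Z.map (fun q => (q.1, (q.2.length : Int))) := by
    have hk : ((Z.map (fun q => (q.1, (q.2.length : Int)))).map Prod.fst).Nodup := by
      rw [List.map_map]
      have : (Prod.fst ∘ fun q : String × List String => (q.1, (q.2.length : Int))) = Prod.fst := rfl
      rw [this, hZfst]; exact hnodup
    have := PySem.Dict.items_foldl_insert_fresh (Z.map (fun q => (q.1, (q.2.length : Int))))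
      Prod.fst Prod.snd PySem.Dict.empty (fun a _ => rfl) hk
    simpa [PySem.Dict.ofList, PySem.Dict.update, PySem.Dict.empty] using this
  have hd2items : (PySem.Dict.ofList Z : PySem.Dict String (List String)).items = Z := by
    have := PySem.Dict.items_foldl_insert_fresh Z Prod.fst Prod.snd PySem.Dict.empty
      (fun a _ => rfl) (by rw [hZfst]; exact hnodup)
    simpa [PySem.Dict.ofList, PySem.Dict.update, PySem.Dict.empty] using this
  rw [hd1items]
  -- sorting the (name, size) pairs is sorting Z by group size, then re-attaching names
  rw [pv_sorted_map (fun q : String × List String => (q.1, (q.2.length : Int))) (fun x => x.2) Z]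
  set W : List (String × List String) := PySem.List.sorted Z (fun a => ((a.2.length : Int))) true with hW
  have hWlen : W.length = n := by rw [hW, PySem.List.length_sorted, hZlen]
  -- the canonical sorted minor list is W with the names stripped
  have hBs : PySem.List.sorted m (fun OG => ((OG.length : Int))) true = W.map Prod.snd := by
    conv_lhs => rw [← hZsnd]
    rw [pv_sorted_map Prod.snd (fun OG => ((OG.length : Int))) Z]
  rw [hBs]
  -- A's loop = map over enumerate
  rw [pv_foldl_loop]
  simp only [List.singleton_append, List.cons.injEq]
  constructor
  · -- principal entry
    have h0 : PySem.List.pyGetD TN 0 "" = f 0 := by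
      rw [PySem.List.pyGetD_ofNat', hTN, PySem.List.getD_map_range f (n + 1) 0 "" (by omega)]
    rw [h0]
    have : f 0 = "T1" := rfl
    rw [this, pv_str0]
  · -- minor entries
    rw [show (0 : Int) + 1 = 1 from rfl,
        pv_enumerate_map Prod.snd W 2, show (2 : Int) = 1 + 1 from rfl, pv_enumerate_shift W 1,
        pv_enumerate_map (fun q : String × List String => (q.1, (q.2.length : Int))) W 1]
    rw [List.map_map, List.map_map, List.map_map]
    apply List.map_congr_left
    intro q hq
    obtain ⟨k, hk, hqeq⟩ := (PySem.List.mem_enumerate_iff W 1 q).mp hq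
    have hkn : k < n := by rwa [hWlen] at hk
    have hpW : q.2 ∈ W := by rw [hqeq]; exact List.getElem_mem hk
    have hpZ : q.2 ∈ Z := (PySem.List.mem_sorted Z _ true q.2).mp hpW
    have hlook : ((PySem.Dict.ofList Z : PySem.Dict String (List String)).get? q.2.1).getD [] = q.2.2 := by
      have hfind : Z.find? (fun r => r.1 == q.2.1) = some (q.2.1, q.2.2) :=
        pv_find?_nodup Z q.2.1 q.2.2 (by rw [hZfst]; exact hnodup) (by simpa using hpZ)
      simp [PySem.Dict.get?, hd2items, hfind]
    have hq1 : q.1 = ((1 + k : Nat) : Int) := by rw [hqeq]; push_cast; ring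
    have hTNq : PySem.List.pyGetD TN q.1 "" = "T" ++ PySem.Int.toStr (q.1 + 1) := by
      rw [hq1, PySem.List.pyGetD_natCast, hTN, PySem.List.getD_map_range f (n + 1) (1 + k) "" (by omega)]
    simp only [Function.comp]
    rw [hTNq, hlook, pv_str1]

-- ===== B = canonical form: bucket decomposition of the stable sort =====

-- insertBy skips a prefix it does not insert into
lemma pv_insertBy_append {α : Type} (before : α → α → Bool) (x : α) (L1 L2 : List α)
    (h : ∀ y ∈ L1, before x y = false) :
    PySem.List.insertBy before x (L1 ++ L2) = L1 ++ PySem.List.insertBy before x L2 := by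
  induction L1 with
  | nil => simp
  | cons y ys ih =>
    simp only [List.cons_append, PySem.List.insertBy, h y (by simp)]
    simp only [Bool.false_eq_true, if_false, List.cons.injEq, true_and]
    exact ih (fun z hz => h z (by simp [hz]))

-- inserting one element into the bucket decomposition appends it to its own bucket
lemma pv_insertBy_flatMap {α : Type} (key : α → Int) (x : α) :
    ∀ (sizes : List Int) (xs : List α), sizes.Pairwise (· > ·) → key x ∈ sizes →
    PySem.List.insertBy (fun a b => decide (key b < key a)) x
        (sizes.flatMap (fun s => xs.filter (fun a => key a == s)))
      = sizes.flatMap (fun s => (xs ++ [x]).filter (fun a => key a == s)) := by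
  intro sizes
  induction sizes with
  | nil => intro xs _ hm; simp at hm
  | cons s rest ih =>
    intro xs hp hm
    have hrest : rest.Pairwise (· > ·) := hp.tail
    have hlt : ∀ r ∈ rest, r < s := fun r hr => (List.pairwise_cons.mp hp).1 r hr
    simp only [List.flatMap_cons]
    by_cases hxs : key x = s
    · -- x goes at the end of the first bucket; the tail buckets are unchanged
      have h1 : ∀ y ∈ xs.filter (fun a => key a == s), (decide (key y < key x)) = false := by
        intro y hy
        have : key y = s := by simpa using (List.mem_filter.mp hy).2
        simp [this, hxs]
      have h2 : ∀ y ∈ rest.flatMap (fun r => xs.filter (fun a => key a == r)),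
          (decide (key y < key x)) = true := by
        intro y hy
        obtain ⟨r, hr, hyf⟩ := List.mem_flatMap.mp hy
        have : key y = r := by simpa using (List.mem_filter.mp hyf).2
        simp [this, hxs]
        exact hlt r hr
      rw [pv_insertBy_append _ _ _ _ h1]
      have hins : PySem.List.insertBy (fun a b => decide (key b < key a)) x
          (rest.flatMap (fun r => xs.filter (fun a => key a == r)))
          = x :: rest.flatMap (fun r => xs.filter (fun a => key a == r)) := by
        cases hflat : rest.flatMap (fun r => xs.filter (fun a => key a == r)) with
        | nil => simp [PySem.List.insertBy]
        | cons z zs =>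
          have hz := h2 z (by rw [hflat]; simp)
          simp [PySem.List.insertBy, hz]
      rw [hins]
      have hb1 : (xs ++ [x]).filter (fun a => key a == s) = xs.filter (fun a => key a == s) ++ [x] := by
        simp [List.filter_append, hxs]
      have hb2 : ∀ r ∈ rest, (xs ++ [x]).filter (fun a => key a == r) = xs.filter (fun a => key a == r) := by
        intro r hr
        have : key x ≠ r := by rw [hxs]; exact fun he => absurd (he ▸ hlt r hr) (lt_irrefl s)
        simp [List.filter_append, this]
      rw [hb1, List.flatMap_congr hb2]
      simp
    · -- x skips the first bucket entirely and recurses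
      have hm' : key x ∈ rest := by
        rcases List.mem_cons.mp hm with h | h
        · exact absurd h hxs
        · exact h
      have h1 : ∀ y ∈ xs.filter (fun a => key a == s), (decide (key y < key x)) = false := by
        intro y hy
        have hys : key y = s := by simpa using (List.mem_filter.mp hy).2
        have : key x < s := hlt _ hm'
        simp [hys]; omega
      rw [pv_insertBy_append _ _ _ _ h1, ih xs hrest hm']
      have hb : (xs ++ [x]).filter (fun a => key a == s) = xs.filter (fun a => key a == s) := by
        simp [List.filter_append, hxs]
      rw [hb]

-- the stable descending sort is the concatenation of the size buckets, sizes descending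
lemma pv_sorted_eq_flatMap {α : Type} (key : α → Int) (sizes : List Int)
    (hp : sizes.Pairwise (· > ·)) :
    ∀ (xs : List α), (∀ a ∈ xs, key a ∈ sizes) →
    PySem.List.sorted xs key true = sizes.flatMap (fun s => xs.filter (fun a => key a == s)) := by
  intro xs
  induction xs using List.reverseRecOn with
  | nil => intro _; simp [PySem.List.sorted_rev_eq_foldl_insertBy]
  | append_singleton ys x ih =>
    intro hmem
    rw [PySem.List.sorted_rev_eq_foldl_insertBy, List.foldl_append, List.foldl_cons, List.foldl_nil,
        ← PySem.List.sorted_rev_eq_foldl_insertBy, ih (fun a ha => hmem a (by simp [ha]))]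
    exact pv_insertBy_flatMap key x sizes ys hp (hmem x (by simp))

-- the inner scan over the input for one fixed size, characterised by enumerate of the bucket
lemma pv_inner_loop {α : Type} (key : α → Int) (g : Int → Int → α → String × α) (s : Int)
    (xs : List α) : ∀ (j : Int) (acc : List (String × α)),
    (xs.foldl (fun (st : Int × List (String × α)) a =>
        if (key a == s) then (st.1 + 1, st.2 ++ [g st.1 s a]) else st) (j, acc))
      = (j + ((xs.filter (fun a => key a == s)).length : Int),
         acc ++ (PySem.List.enumerate (xs.filter (fun a => key a == s)) j).map (fun q => g q.1 s q.2)) := by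
  induction xs with
  | nil => intro j acc; simp
  | cons x rest ih =>
    intro j acc
    simp only [List.foldl_cons, List.filter_cons]
    by_cases hx : key x == s
    · simp only [hx, if_pos, PySem.List.enumerate_cons, List.map_cons]
      rw [ih]
      simp only [Prod.mk.injEq, List.length_cons]
      constructor
      · push_cast; omega
      · simp
    · simp only [hx, Bool.false_eq_true, if_false]
      rw [ih]

-- the outer loop over the sizes, characterised by enumerate of the flatMap
lemma pv_outer_loop {α : Type} (key : α → Int) (g : Int → Int → α → String × α)
    (m : List α) : ∀ (sizes : List Int) (j : Int) (acc : List (String × α)),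
    (sizes.foldl (fun (st : Int × List (String × α)) s =>
        m.foldl (fun (st : Int × List (String × α)) a =>
          if (key a == s) then (st.1 + 1, st.2 ++ [g st.1 s a]) else st) st) (j, acc)).2
      = acc ++ (PySem.List.enumerate (sizes.flatMap (fun s => m.filter (fun a => key a == s))) j).map
          (fun q => g q.1 (key q.2) q.2) := by
  intro sizes
  induction sizes with
  | nil => intro j acc; simp
  | cons s rest ih =>
    intro j acc
    simp only [List.foldl_cons, List.flatMap_cons]
    rw [pv_inner_loop key g s m j acc, ih, PySem.List.enumerate_append, List.map_append,
        List.append_assoc]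
    congr 2
    apply List.map_congr_left
    intro q hq
    obtain ⟨k, hk, hqeq⟩ := (PySem.List.mem_enumerate_iff _ j q).mp hq
    have hq2 : q.2 ∈ m.filter (fun a => key a == s) := by
      rw [hqeq]; exact List.getElem_mem hk
    have : key q.2 = s := by simpa using (List.mem_filter.mp hq2).2
    rw [this]

lemma pv_main_B (p : List String) (m : List (List String)) (t : String) :
    rename_OGs_tre_name_alt p m t = pvCanon p m t := by
  simp only [rename_OGs_tre_name_alt, pvCanon]
  set key : List String → Int := fun OG => (OG.length : Int) with hkey
  set sizes : List Int := PySem.List.sorted (PySem.Set.ofList (m.map key)) (fun x => x) true with hsizes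
  have hpw : sizes.Pairwise (· > ·) := by
    have h1 : sizes.Pairwise (fun a b => b ≤ a) := PySem.List.sorted_pairwise_rev _ _
    have h2 : sizes.Nodup :=
      ((PySem.List.sorted_perm (PySem.Set.ofList (m.map key)) (fun x => x) true).nodup_iff).mpr
        (PySem.Set.nodup_ofList _)
    exact (h2.and h1).imp (fun {a b} h => lt_of_le_of_ne h.2 (Ne.symm h.1))
  have hmem : ∀ a ∈ m, key a ∈ sizes := by
    intro a ha
    rw [hsizes, PySem.List.mem_sorted, PySem.Set.mem_ofList]
    exact List.mem_map.mpr ⟨a, ha, rfl⟩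
  rw [pv_outer_loop key (fun i s OG => (t ++ "_T" ++ PySem.Int.toStr i ++ "_" ++ PySem.Int.toStr s, OG)) m sizes 2,
      ← pv_sorted_eq_flatMap key sizes hpw m hmem]
  rfl

-- ===== VERDICT (by name: the statement is the Claim_ definition above) =====
theorem rename_OGs_tre_name_spec : Claim_equal_rename_OGs_tre_name := by
  intro p m t _
  unfold Spec_rename_OGs_tre_name
  rw [pv_main_A, pv_main_B]
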